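-- pv_equiv track=rewrite | github.com/hemidactylus/ostracion | ostracion_app/utilities/tools/formatting.py | applyReplacementPairs
-- ===== SOURCE A (Python) =====
-- def applyReplacementPairs(txt, reps):
--     """ Apply a chain of replacements
--             [(old1,new1), (old2,new2), ...]
--         to a text.
--     """
--     if len(reps) == 0:
--         return txt
--     else:
--         return applyReplacementPairs(
--             txt.replace(reps[0][0], reps[0][1]),
--             reps[1:],
--         )
-- ===== SOURCE B (Python) =====
-- def applyReplacementPairs(txt, reps):
--     """ Apply a chain of replacements
--             [(old1,new1), (old2,new2), ...]
--         to a text.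
--     """
--     for old, new in reps:
--         txt = txt.replace(old, new)
--     return txt
-- ===== Notes on version B (the rewrite author's own statement) =====
-- stated objective: idiomatic
-- what changed: Replaced the recursion-with-slicing by a flat iterative loop (a fold) over the pairs, applying each replacement in order.
import Mathlib
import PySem

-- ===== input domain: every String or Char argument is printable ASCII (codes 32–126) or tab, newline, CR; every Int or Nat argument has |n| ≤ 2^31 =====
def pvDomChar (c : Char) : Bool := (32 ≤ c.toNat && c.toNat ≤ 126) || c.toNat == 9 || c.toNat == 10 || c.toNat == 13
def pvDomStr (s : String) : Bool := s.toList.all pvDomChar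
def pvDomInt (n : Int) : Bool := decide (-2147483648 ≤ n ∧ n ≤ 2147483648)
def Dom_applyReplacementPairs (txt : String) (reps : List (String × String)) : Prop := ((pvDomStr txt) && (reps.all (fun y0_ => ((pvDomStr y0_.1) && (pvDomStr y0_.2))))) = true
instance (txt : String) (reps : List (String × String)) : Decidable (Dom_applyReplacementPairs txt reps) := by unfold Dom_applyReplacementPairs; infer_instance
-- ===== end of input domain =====

-- B replaces A's recursion-with-slicing by an iterative fold over the pairs (idiomatic decomposition; same result).

-- ===== PORT A =====
-- literal transliteration of A's recursion: empty check, head replacement, recurse on reps[1:]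
def applyReplacementPairs (txt : String) (reps : List (String × String)) : String :=
  if reps.length = 0 then txt
  else
    applyReplacementPairs (PySem.Str.replace txt (reps.headI.1) (reps.headI.2))
      (PySem.List.slice reps (some 1) none)
termination_by reps.length
decreasing_by
  rename_i h
  rw [PySem.List.slice_from_one]
  cases reps with
  | nil => simp at h
  | cons a t => simp

-- ===== PORT B =====
def applyReplacementPairs_alt (txt : String) (reps : List (String × String)) : String :=
  reps.foldl (fun t p => PySem.Str.replace t p.1 p.2) txt

-- ===== PRECONDITION & SPEC =====
def Spec_applyReplacementPairs (txt : String) (reps : List (String × String)) (out : String) : Prop := out = applyReplacementPairs_alt txt reps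
instance (txt : String) (reps : List (String × String)) (out : String) : Decidable (Spec_applyReplacementPairs txt reps out) := by unfold Spec_applyReplacementPairs; infer_instance

-- ===== CLAIM (what is proved, stated in full; the proofs are below) =====
def Claim_equal_applyReplacementPairs : Prop := ∀ (txt : String) (reps : List (String × String)), Dom_applyReplacementPairs txt reps → Spec_applyReplacementPairs txt reps (applyReplacementPairs txt reps)

-- ===== LEMMAS AND PROOFS =====
theorem applyReplacementPairs_eq_alt (reps : List (String × String)) :
    ∀ txt, applyReplacementPairs txt reps = applyReplacementPairs_alt txt reps := by
  induction reps with
  | nil => intro txt; rw [applyReplacementPairs]; simp [applyReplacementPairs_alt]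
  | cons p t ih =>
    intro txt
    rw [applyReplacementPairs]
    simp only [List.length_cons, PySem.List.slice_from_one, List.tail_cons,
      Nat.succ_ne_zero, if_false, List.headI]
    rw [ih]
    rfl

-- ===== VERDICT (by name: the statement is the Claim_ definition above) =====
theorem applyReplacementPairs_spec : Claim_equal_applyReplacementPairs := by
  intro txt reps _
  exact applyReplacementPairs_eq_alt reps txt
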